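-- pv_equiv track=rewrite | github.com/nastyh/LeetCode | Basic Data Structures/engagement_relevancy_score.py | count_candidates
-- ===== SOURCE A (Python) =====
-- def count_candidates(es, rs, K):
--     """
--     O(nlogn): sorting takes over
--     O(n), n is the size of inputs es, rs
--     """
--     # Step 1: Pair engagement and relevance scores
--     candidates = list(zip(es, rs))
--     # Step 2: Sort candidates by engagement score
--     # when processing a candidate, all prior candidates have es[j] < es[i]
--     candidates.sort()
--     # Step 3: Coordinate compression for relevance scores
--     sorted_rs = sorted(set(rs))
--     rank = {v: i + 1 for i, v in enumerate(sorted_rs)}  # 1-based indexing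
--     # Step 4: Initialize BIT (Fenwick Tree)
--     n = len(sorted_rs)
--     BIT = [0] * (n + 1)
--     # For each candidate, query the BIT to find how many relevance scores are smaller than rs[i]
--     def _update(index, delta):
--         while index <= n:
--             BIT[index] += delta
--             index += index & -index
--     def _query(index):
--         total = 0
--         while index > 0:
--             total += BIT[index]
--             index -= index & -index
--         return total
--     # Step 5: Process candidates and count valid ones
--     valid_count = 0
--     for _, r in candidates:
--         # Query the number of relevance scores less than the current one
--         count_less_than_r = _query(rank[r] - 1)
--         if count_less_than_r >= K:
--             valid_count += 1
--         # Update the BIT with the current relevance score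
--         _update(rank[r], 1)
--     return valid_count
-- ===== SOURCE B (Python) =====
-- def count_candidates(es, rs, K):
--     pairs = list(zip(es, rs))
--     valid = 0
--     for e, r in pairs:
--         beaten = 0
--         for e2, r2 in pairs:
--             if e2 <= e and r2 < r:
--                 beaten += 1
--         if beaten >= K:
--             valid += 1
--     return valid
-- ===== Notes on version B (the rewrite author's own statement) =====
-- stated objective: simpler
-- what changed: Replaced the sort + coordinate compression + Fenwick tree pipeline with a direct double loop that, for each candidate (e,r), counts candidates (e2,r2) with e2 <= e and r2 < r.
import Mathlib
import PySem

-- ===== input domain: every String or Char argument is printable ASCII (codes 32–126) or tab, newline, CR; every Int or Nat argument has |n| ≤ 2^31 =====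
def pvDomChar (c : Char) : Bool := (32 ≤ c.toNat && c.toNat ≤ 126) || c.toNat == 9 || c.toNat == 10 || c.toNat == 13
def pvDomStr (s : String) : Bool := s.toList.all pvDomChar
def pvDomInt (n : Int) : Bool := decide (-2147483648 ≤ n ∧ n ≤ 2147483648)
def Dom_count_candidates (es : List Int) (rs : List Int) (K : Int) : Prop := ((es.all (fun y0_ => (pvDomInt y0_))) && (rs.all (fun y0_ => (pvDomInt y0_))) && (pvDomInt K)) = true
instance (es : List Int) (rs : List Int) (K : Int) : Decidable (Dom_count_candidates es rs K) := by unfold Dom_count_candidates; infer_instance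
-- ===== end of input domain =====

-- B replaces A's sort + coordinate compression + Fenwick-tree pipeline by a direct double
-- loop counting, for each candidate (e, r), the candidates (e2, r2) with e2 ≤ e and r2 < r.

-- ===== PORT A =====
-- index & -index  (Python's two's-complement bitwise AND)
def pvLow (i : Int) : Int := PySem.Int.band i (-i)

-- 'while index <= n: BIT[index] += delta; index += index & -index'
-- (fuel only makes the recursion structural; the call site passes fuel > number of iterations,
--  which is enough because index grows by at least 1 per step while index stays in [1, n])
def pvUpdate (BIT : List Int) (n : Int) (fuel : Nat) (index delta : Int) : List Int :=
  match fuel with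
  | 0 => BIT
  | f + 1 =>
    if index ≤ n then
      pvUpdate (BIT.set index.toNat (BIT.getD index.toNat 0 + delta)) n f (index + pvLow index) delta
    else BIT

-- 'total = 0; while index > 0: total += BIT[index]; index -= index & -index; return total'
def pvQuery (BIT : List Int) (fuel : Nat) (index : Int) : Int :=
  match fuel with
  | 0 => 0
  | f + 1 =>
    if index > 0 then BIT.getD index.toNat 0 + pvQuery BIT f (index - pvLow index) else 0

-- sorted_rs = sorted(set(rs))
def pvSrs (rs : List Int) : List Int := PySem.List.sorted (PySem.Set.ofList rs) (fun x => x)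

-- rank = {v: i + 1 for i, v in enumerate(sorted_rs)}
def pvRank (rs : List Int) : PySem.Dict Int Int :=
  (PySem.List.enumerate (pvSrs rs) 0).foldl
    (fun d (p : Int × Int) => d.insert p.2 (p.1 + 1)) PySem.Dict.empty

def count_candidates (es : List Int) (rs : List Int) (K : Int) : Int :=
  -- candidates = list(zip(es, rs)); candidates.sort()   (tuple order = lexicographic)
  let candidates := PySem.List.sorted2 (es.zip rs) (fun p => p.1) (fun p => p.2)
  let rank := pvRank rs
  let n : Int := PySem.List.len (pvSrs rs)
  -- BIT = [0] * (n + 1)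
  let BIT0 := PySem.List.pyRepeat [(0 : Int)] (n + 1)
  -- for _, r in candidates: ...
  let st := candidates.foldl
    (fun (st : List Int × Int) c =>
      -- rank[r]; the key is always present (r comes from rs), so Python never raises here
      let rk := (rank.get? c.2).getD 0
      let cl := pvQuery st.1 (n.toNat + 1) (rk - 1)
      let vc := if cl ≥ K then st.2 + 1 else st.2
      (pvUpdate st.1 n (n.toNat + 1) rk 1, vc))
    (BIT0, (0 : Int))
  st.2

-- ===== PORT B =====
def count_candidates_alt (es : List Int) (rs : List Int) (K : Int) : Int :=
  let pairs := es.zip rs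
  pairs.foldl
    (fun valid p =>
      let beaten := pairs.foldl
        (fun b q => if q.1 ≤ p.1 ∧ q.2 < p.2 then b + 1 else b) (0 : Int)
      if beaten ≥ K then valid + 1 else valid)
    0

-- ===== PRECONDITION & SPEC =====
def Spec_count_candidates (es : List Int) (rs : List Int) (K : Int) (out : Int) : Prop := out = count_candidates_alt es rs K
instance (es : List Int) (rs : List Int) (K : Int) (out : Int) : Decidable (Spec_count_candidates es rs K out) := by unfold Spec_count_candidates; infer_instance

-- ===== CLAIM (what is proved, stated in full; the proofs are below) =====
def Claim_equal_count_candidates : Prop := ∀ (es : List Int) (rs : List Int) (K : Int), Dom_count_candidates es rs K → Spec_count_candidates es rs K (count_candidates es rs K)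

-- ===== LEMMAS AND PROOFS =====

def lbN (m : Nat) : Nat := m - (m &&& (m - 1))

lemma lbN_odd (a : Nat) : lbN (2 * a + 1) = 1 := by
  have h := Nat.land_bit true a false a
  simp [Nat.bit] at h
  simp [lbN, show 2*a+1-1 = 2*a by omega, h]

lemma lbN_even (a : Nat) (ha : 0 < a) : lbN (2 * a) = 2 * lbN a := by
  have h := Nat.land_bit false a true (a - 1)
  simp [Nat.bit] at h
  have h2 : 2 * (a - 1) + 1 = 2 * a - 1 := by omega
  rw [h2] at h
  have h3 := Nat.and_le_left (n := a) (m := a - 1)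
  simp [lbN, h]
  omega

lemma lbN_spec (m : Nat) (hm : 0 < m) : ∃ k u, m = 2 ^ k * (2 * u + 1) ∧ lbN m = 2 ^ k := by
  induction m using Nat.strong_induction_on with
  | _ m ih =>
    rcases Nat.even_or_odd m with ⟨a, ha⟩ | ⟨a, ha⟩
    · have ha' : m = 2 * a := by omega
      have hapos : 0 < a := by omega
      obtain ⟨k, u, h1, h2⟩ := ih a (by omega) hapos
      exact ⟨k + 1, u, by rw [ha', h1]; ring, by rw [ha', lbN_even a hapos, h2, pow_succ]; ring⟩
    · exact ⟨0, a, by omega, by rw [ha, lbN_odd]; rfl⟩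

lemma lbN_pow (k u : Nat) : lbN (2 ^ k * (2 * u + 1)) = 2 ^ k := by
  induction k with
  | zero => simpa using lbN_odd u
  | succ k ih =>
    have h : 2 ^ (k+1) * (2 * u + 1) = 2 * (2 ^ k * (2 * u + 1)) := by ring
    rw [h, lbN_even _ (by positivity), ih, pow_succ]; ring

lemma lbN_pos_le (m : Nat) (hm : 0 < m) : 1 ≤ lbN m ∧ lbN m ≤ m := by
  obtain ⟨k, u, h1, h2⟩ := lbN_spec m hm
  constructor
  · rw [h2]; exact Nat.one_le_two_pow
  · rw [h2, h1]; nlinarith [Nat.one_le_two_pow (n := k)]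

lemma lbN_add_double (m : Nat) (hm : 0 < m) : 2 * lbN m ≤ lbN (m + lbN m) := by
  obtain ⟨k, u, h1, h2⟩ := lbN_spec m hm
  obtain ⟨j, w, g1, g2⟩ := lbN_spec (u + 1) (by omega)
  have h3 : m + lbN m = 2 ^ (k + 1 + j) * (2 * w + 1) := by
    rw [h2, h1]
    have e1 : 2 ^ k * (2 * u + 1) + 2 ^ k = 2 ^ (k + 1) * (u + 1) := by rw [pow_succ]; ring
    rw [e1, g1, pow_add]; ring
  rw [h3, lbN_pow, h2, pow_add, pow_add]
  nlinarith [Nat.one_le_two_pow (n := j), Nat.one_le_two_pow (n := k)]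

lemma lbN_add_low (s b t : Nat) (ht : 0 < t) (hts : t < 2 ^ s) : lbN (2 ^ s * b + t) = lbN t := by
  obtain ⟨c, w, h1, h2⟩ := lbN_spec t ht
  have hcs : c < s := by
    by_contra h
    have hsc : s ≤ c := by omega
    have : 2 ^ s ≤ 2 ^ c := Nat.pow_le_pow_right (by omega) hsc
    nlinarith
  have h3 : 2 ^ s * b + t = 2 ^ c * (2 * (2 ^ (s - c - 1) * b + w) + 1) := by
    rw [h1]
    have : 2 ^ s = 2 ^ c * (2 * 2 ^ (s - c - 1)) := by
      rw [← pow_succ']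
      rw [← pow_add]
      congr 1
      omega
    rw [this]; ring
  rw [h3, lbN_pow, h2]

lemma lbN_step_le (s t : Nat) (ht : 0 < t) (hts : t < 2 ^ s) : t + lbN t ≤ 2 ^ s := by
  obtain ⟨c, w, h1, h2⟩ := lbN_spec t ht
  have hcs : c < s := by
    by_contra h
    have hsc : s ≤ c := by omega
    have : 2 ^ s ≤ 2 ^ c := Nat.pow_le_pow_right (by omega) hsc
    nlinarith
  have hsplit : 2 ^ s = 2 ^ c * 2 ^ (s - c) := by rw [← pow_add]; congr 1; omega
  have hw : 2 * w + 1 < 2 ^ (s - c) := by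
    by_contra h
    have h' : 2 ^ (s - c) ≤ 2 * w + 1 := by omega
    nlinarith [Nat.one_le_two_pow (n := c), h']
  have hw2 : 2 * w + 2 ≤ 2 ^ (s - c) := by omega
  rw [h2, h1, hsplit]
  nlinarith [Nat.one_le_two_pow (n := c)]

lemma lbN_climb (v c : Nat) (_hv : 0 < v) (hvc : v < c) (h : c - lbN c < v) : v + lbN v ≤ c := by
  obtain ⟨k, u, h1, h2⟩ := lbN_spec c (by omega)
  have hA : c = 2 ^ k * (2 * u) + 2 ^ k := by rw [h1]; ring
  have hlbc : lbN c ≤ c := (lbN_pos_le c (by omega)).2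
  set A := 2 ^ k * (2 * u) with hAdef
  set t := v - A with htdef
  have ht0 : 0 < t := by omega
  have hts : t < 2 ^ k := by omega
  have hvA : v = A + t := by omega
  have hlv : lbN v = lbN t := by rw [hvA]; exact lbN_add_low k (2 * u) t ht0 hts
  have hstep := lbN_step_le k t ht0 hts
  omega

lemma pvLow_eq (i : Int) (hi : 0 < i) : pvLow i = (lbN i.toNat : Int) := by
  have h0 : (0:Int) ≤ i := by omega
  have h1 : ¬ ((0:Int) ≤ -i) := by omega
  simp only [pvLow, PySem.Int.band, if_pos h0, if_neg h1]
  have h2 : (- -i - 1).toNat = i.toNat - 1 := by omega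
  rw [h2]
  simp [lbN]

lemma pvLow_pos_le (i : Int) (hi : 0 < i) : 1 ≤ pvLow i ∧ pvLow i ≤ i := by
  rw [pvLow_eq i hi]
  have := lbN_pos_le i.toNat (by omega)
  omega

lemma pvLow_add_double (v : Int) (hv : 0 < v) : 2 * pvLow v ≤ pvLow (v + pvLow v) := by
  have h1 := pvLow_eq v hv
  have h2 := (pvLow_pos_le v hv).1
  have h3 : 0 < v + pvLow v := by omega
  rw [pvLow_eq _ h3, h1]
  have h4 : (v + (lbN v.toNat : Int)).toNat = v.toNat + lbN v.toNat := by omega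
  rw [h4]
  have := lbN_add_double v.toNat (by omega)
  omega

lemma pvLow_climb (v c : Int) (hv : 0 < v) (hvc : v < c) (hc : c - pvLow c < v) :
    v + pvLow v ≤ c := by
  have h1 := pvLow_eq v hv
  have h2 := pvLow_eq c (by omega)
  have h3 := lbN_climb v.toNat c.toNat (by omega) (by omega) (by omega)
  omega

-- ---- the two Fenwick chains ----
def uChain (n : Int) (v : Int) : List Int :=
  if _h : v ≤ 0 ∨ n < v then [] else v :: uChain n (v + pvLow v)
termination_by (n + 1 - v).toNat
decreasing_by
  have := pvLow_pos_le v (by omega)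
  omega

def qChain (k : Int) : List Int :=
  if _h : k ≤ 0 then [] else k :: qChain (k - pvLow k)
termination_by k.toNat
decreasing_by
  have := pvLow_pos_le k (by omega)
  omega

lemma uChain_mem (n w : Int) : ∀ c ∈ uChain n w, w ≤ c ∧ 1 ≤ c ∧ c ≤ n := by
  have hgen : ∀ (d : Nat) (w : Int), (n + 1 - w).toNat = d →
      ∀ c ∈ uChain n w, w ≤ c ∧ 1 ≤ c ∧ c ≤ n := by
    intro d
    induction d using Nat.strong_induction_on with
    | _ d ihd =>
      intro w hd c hc
      rw [uChain] at hc
      by_cases hcase : w ≤ 0 ∨ n < w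
      · rw [dif_pos hcase] at hc; simp at hc
      · rw [dif_neg hcase] at hc
        rcases List.mem_cons.mp hc with rfl | hc
        · omega
        · have h3 := pvLow_pos_le w (by omega)
          have h2 := ihd (n + 1 - (w + pvLow w)).toNat (by omega) (w + pvLow w) rfl c hc
          omega
  exact hgen (n + 1 - w).toNat w rfl

lemma uChain_sound (n v : Int) (_hv : 1 ≤ v) :
    ∀ w, v ≤ w → w - pvLow w < v → ∀ c ∈ uChain n w, c - pvLow c < v ∧ v ≤ c := by
  have hgen : ∀ (d : Nat) (w : Int), (n + 1 - w).toNat = d → v ≤ w → w - pvLow w < v →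
      ∀ c ∈ uChain n w, c - pvLow c < v ∧ v ≤ c := by
    intro d
    induction d using Nat.strong_induction_on with
    | _ d ihd =>
      intro w hd hvw hint c hc
      rw [uChain] at hc
      by_cases hcase : w ≤ 0 ∨ n < w
      · rw [dif_pos hcase] at hc; simp at hc
      · rw [dif_neg hcase] at hc
        rcases List.mem_cons.mp hc with rfl | hc
        · exact ⟨hint, hvw⟩
        · have hw : (0:Int) < w := by omega
          have hlp := pvLow_pos_le w hw
          have hdd := pvLow_add_double w hw
          have hlp2 := pvLow_pos_le (w + pvLow w) (by omega)
          exact ihd (n + 1 - (w + pvLow w)).toNat (by omega) (w + pvLow w) rfl (by omega)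
            (by omega) c hc
  intro w h1 h2
  exact hgen (n + 1 - w).toNat w rfl h1 h2

lemma uChain_complete (n v c : Int) (hv : 1 ≤ v) (hvc : v ≤ c) (hint : c - pvLow c < v)
    (hcn : c ≤ n) : c ∈ uChain n v := by
  have hgen : ∀ (d : Nat) (v : Int), (c - v).toNat = d → 1 ≤ v → v ≤ c → c - pvLow c < v →
      c ∈ uChain n v := by
    intro d
    induction d using Nat.strong_induction_on with
    | _ d ihd =>
      intro v hd hv1 hvc hint
      rcases eq_or_lt_of_le hvc with rfl | hlt
      · rw [uChain, dif_neg (by omega)]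
        exact List.mem_cons_self
      · have hclimb := pvLow_climb v c (by omega) hlt hint
        have hlv := pvLow_pos_le v (by omega)
        rw [uChain, dif_neg (by omega)]
        refine List.mem_cons.mpr (Or.inr ?_)
        exact ihd (c - (v + pvLow v)).toNat (by omega) (v + pvLow v) rfl (by omega) hclimb
          (by omega)
  exact hgen (c - v).toNat v rfl hv hvc hint

lemma uChain_iff (n v c : Int) (hv : 1 ≤ v) (_hc1 : 1 ≤ c) (hcn : c ≤ n) :
    c ∈ uChain n v ↔ (c - pvLow c < v ∧ v ≤ c) := by
  constructor
  · intro h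
    have h0 := pvLow_pos_le v (by omega)
    exact uChain_sound n v hv v le_rfl (by omega) c h
  · rintro ⟨h1, h2⟩
    exact uChain_complete n v c hv h2 h1 hcn

lemma qChain_mem (k : Int) : ∀ c ∈ qChain k, 1 ≤ c ∧ c ≤ k := by
  have hgen : ∀ (d : Nat) (k : Int), k.toNat = d → ∀ c ∈ qChain k, 1 ≤ c ∧ c ≤ k := by
    intro d
    induction d using Nat.strong_induction_on with
    | _ d ihd =>
      intro k hd c hc
      rw [qChain] at hc
      by_cases hcase : k ≤ 0
      · rw [dif_pos hcase] at hc; simp at hc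
      · rw [dif_neg hcase] at hc
        rcases List.mem_cons.mp hc with rfl | hc
        · omega
        · have h3 := pvLow_pos_le k (by omega)
          have h2 := ihd (k - pvLow k).toNat (by omega) (k - pvLow k) rfl c hc
          omega
  exact hgen k.toNat k rfl

lemma qChain_partition (k v : Int) (hv : 1 ≤ v) (hvk : v ≤ k) :
    (qChain k).countP (fun c => decide (c - pvLow c < v ∧ v ≤ c)) = 1 := by
  have hgen : ∀ (d : Nat) (k : Int), k.toNat = d → v ≤ k →
      (qChain k).countP (fun c => decide (c - pvLow c < v ∧ v ≤ c)) = 1 := by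
    intro d
    induction d using Nat.strong_induction_on with
    | _ d ihd =>
      intro k hd hvk
      rw [qChain, dif_neg (by omega : ¬ k ≤ 0), List.countP_cons]
      have hlk := pvLow_pos_le k (by omega)
      by_cases hv' : v ≤ k - pvLow k
      · rw [ihd (k - pvLow k).toNat (by omega) (k - pvLow k) rfl hv']
        have : ¬ (k - pvLow k < v ∧ v ≤ k) := by omega
        simp [this]
      · have htail : (qChain (k - pvLow k)).countP
            (fun c => decide (c - pvLow c < v ∧ v ≤ c)) = 0 := by
          rw [List.countP_eq_zero]
          intro c hc
          have := qChain_mem (k - pvLow k) c hc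
          simp only [decide_eq_true_eq]
          omega
        rw [htail]
        have : (k - pvLow k < v ∧ v ≤ k) := by omega
        simp [this]
  exact hgen k.toNat k rfl hvk

lemma chain_count (n k v : Int) (hv : 1 ≤ v) (_hvn : v ≤ n) (_hk0 : 0 ≤ k) (hkn : k ≤ n) :
    (qChain k).countP (fun c => decide (c ∈ uChain n v)) = if v ≤ k then 1 else 0 := by
  split_ifs with hvk
  · rw [List.countP_congr, qChain_partition k v hv hvk]
    intro c hc
    have hm := qChain_mem k c hc
    simp only [decide_eq_true_eq]
    rw [uChain_iff n v c hv (by omega) (by omega)]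
  · rw [List.countP_eq_zero]
    intro c hc
    have hm := qChain_mem k c hc
    simp only [decide_eq_true_eq]
    intro hmem
    have := uChain_mem n v c hmem
    omega

-- ---- query / update against the chains ----
def qsum (BIT : List Int) (k : Int) : Int := ((qChain k).map (fun c => BIT.getD c.toNat 0)).sum

lemma pvQuery_eq_qsum (BIT : List Int) (fuel : Nat) (k : Int) (hf : k.toNat < fuel) :
    pvQuery BIT fuel k = qsum BIT k := by
  induction fuel generalizing k with
  | zero => omega
  | succ f ih =>
    simp only [pvQuery]
    by_cases hk : k > 0
    · have hlk := pvLow_pos_le k (by omega)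
      rw [if_pos hk, qsum, qChain, dif_neg (by omega : ¬ k ≤ 0), List.map_cons, List.sum_cons,
        ← qsum, ih (k - pvLow k) (by omega)]
    · rw [if_neg hk, qsum, qChain, dif_pos (by omega : k ≤ 0)]
      simp

lemma pvUpdate_length (BIT : List Int) (n : Int) (fuel : Nat) (v d : Int) :
    (pvUpdate BIT n fuel v d).length = BIT.length := by
  induction fuel generalizing BIT v with
  | zero => rfl
  | succ f ih =>
    simp only [pvUpdate]
    split
    · rw [ih]; simp
    · rfl

lemma pvUpdate_getD (n : Int) : ∀ (fuel : Nat) (BIT : List Int) (v : Int), 1 ≤ v →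
    (n + 1 - v).toNat ≤ fuel → BIT.length = n.toNat + 1 → ∀ p : Int, 1 ≤ p →
    (pvUpdate BIT n fuel v 1).getD p.toNat 0
      = BIT.getD p.toNat 0 + (if p ∈ uChain n v then 1 else 0) := by
  intro fuel
  induction fuel with
  | zero =>
    intro BIT v hv hf hlen p hp
    rw [uChain, dif_pos (by omega : v ≤ 0 ∨ n < v)]
    simp [pvUpdate]
  | succ f ih =>
    intro BIT v hv hf hlen p hp
    by_cases hvn : v ≤ n
    · have hlv := pvLow_pos_le v (by omega)
      rw [uChain, dif_neg (by omega : ¬ (v ≤ 0 ∨ n < v))]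
      simp only [pvUpdate, if_pos hvn]
      rw [ih _ (v + pvLow v) (by omega) (by omega) (by simp [hlen]) p hp]
      by_cases hpv : p = v
      · subst hpv
        have hnot : p ∉ uChain n (p + pvLow p) := by
          intro hmem
          have := uChain_mem n (p + pvLow p) p hmem
          omega
        have hrange : p.toNat < BIT.length := by omega
        have hset : (BIT.set p.toNat (BIT.getD p.toNat 0 + 1)).getD p.toNat 0
            = BIT.getD p.toNat 0 + 1 := by
          simp [List.getD_eq_getElem?_getD, hrange]
        rw [hset]
        simp [hnot, List.mem_cons]
      · have hne : v.toNat ≠ p.toNat := by omega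
        have hset : (BIT.set v.toNat (BIT.getD v.toNat 0 + 1)).getD p.toNat 0
            = BIT.getD p.toNat 0 := by
          simp [List.getD_eq_getElem?_getD, hne]
        rw [hset]
        have hmemiff : (p ∈ v :: uChain n (v + pvLow v)) ↔ p ∈ uChain n (v + pvLow v) := by
          simp [List.mem_cons, hpv]
        simp only [hmemiff]
    · rw [uChain, dif_pos (by omega : v ≤ 0 ∨ n < v)]
      simp only [pvUpdate, if_neg hvn]
      simp

lemma qsum_update (n : Int) (BIT : List Int) (v k : Int) (hv : 1 ≤ v) (hvn : v ≤ n)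
    (hk0 : 0 ≤ k) (hkn : k ≤ n) (fuel : Nat) (hf : (n + 1 - v).toNat ≤ fuel)
    (hlen : BIT.length = n.toNat + 1) :
    qsum (pvUpdate BIT n fuel v 1) k = qsum BIT k + (if v ≤ k then 1 else 0) := by
  have hmap : (qChain k).map (fun c => (pvUpdate BIT n fuel v 1).getD c.toNat 0)
      = (qChain k).map (fun c => BIT.getD c.toNat 0 + (if c ∈ uChain n v then 1 else 0)) :=
    List.map_congr_left (fun c hc =>
      pvUpdate_getD n fuel BIT v hv hf hlen c (qChain_mem k c hc).1)
  have hconv : (fun c => if c ∈ uChain n v then (1:Int) else 0)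
      = (fun c => if (fun c => decide (c ∈ uChain n v)) c = true then (1:Int) else 0) := by
    funext c
    by_cases h : c ∈ uChain n v <;> simp [h]
  rw [qsum, qsum, hmap, PySem.List.sum_map_add_int, hconv,
    PySem.List.sum_map_ite_one_zero, chain_count n k v hv hvn hk0 hkn]
  split <;> simp

lemma sorted2_eq_sorted_lex (xs : List (Int × Int)) :
    PySem.List.sorted2 xs (fun p => p.1) (fun p => p.2) false
      = PySem.List.sorted xs (fun p => toLex p) false := by
  have hbe : (fun a b : Int × Int =>
        decide (a.1 < b.1) || (!decide (b.1 < a.1) && decide (a.2 < b.2)))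
      = (fun a b : Int × Int => decide (toLex a < toLex b)) := by
    funext a b
    have hiff : (toLex a < toLex b) ↔ (a.1 < b.1 ∨ a.1 = b.1 ∧ a.2 < b.2) := Prod.Lex.lt_iff
    by_cases h1 : a.1 < b.1 <;> by_cases h2 : b.1 < a.1 <;> by_cases h3 : a.2 < b.2 <;>
      simp [h1, h2, h3, hiff] <;> omega
  show List.foldl (fun acc x => PySem.List.insertBy
      (fun a b : Int × Int =>
        decide (a.1 < b.1) || (!decide (b.1 < a.1) && decide (a.2 < b.2))) x acc) [] xs
    = List.foldl (fun acc x => PySem.List.insertBy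
      (fun a b : Int × Int => decide (toLex a < toLex b)) x acc) [] xs
  rw [hbe]

lemma sorted2_lex_pairwise (xs : List (Int × Int)) :
    (PySem.List.sorted2 xs (fun p => p.1) (fun p => p.2) false).Pairwise
      (fun a b => a.1 < b.1 ∨ (a.1 = b.1 ∧ a.2 ≤ b.2)) := by
  rw [sorted2_eq_sorted_lex]
  have h := PySem.List.sorted_pairwise (xs := xs) (key := fun p => toLex p)
  refine h.imp ?_
  intro a b hab
  have : (toLex a ≤ toLex b) ↔ (a.1 < b.1 ∨ a.1 = b.1 ∧ a.2 ≤ b.2) := Prod.Lex.le_iff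
  exact this.mp hab

def cntLT (l : List (Int × Int)) (p : Int × Int) : Nat :=
  l.countP (fun q => decide (q.1 ≤ p.1 ∧ q.2 < p.2))

lemma prefix_count (pre suf : List (Int × Int)) (p : Int × Int)
    (hpw : (pre ++ p :: suf).Pairwise (fun a b => a.1 < b.1 ∨ (a.1 = b.1 ∧ a.2 ≤ b.2))) :
    pre.countP (fun q => decide (q.2 < p.2)) = cntLT (pre ++ p :: suf) p := by
  rw [List.pairwise_append] at hpw
  obtain ⟨hpre, hps, hcross⟩ := hpw
  rw [List.pairwise_cons] at hps
  rw [cntLT, List.countP_append, List.countP_cons]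
  have h1 : pre.countP (fun q => decide (q.2 < p.2))
      = pre.countP (fun q => decide (q.1 ≤ p.1 ∧ q.2 < p.2)) := by
    apply List.countP_congr
    intro q hq
    have := hcross q hq p List.mem_cons_self
    simp only [decide_eq_true_eq]
    constructor <;> intro h <;> [exact ⟨by omega, h⟩; exact h.2]
  have h2 : suf.countP (fun q => decide (q.1 ≤ p.1 ∧ q.2 < p.2)) = 0 := by
    rw [List.countP_eq_zero]
    intro b hb
    have := hps.1 b hb
    simp only [decide_eq_true_eq]
    omega
  rw [h1, h2]
  simp

-- ---- the rank dictionary ----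
def pvRk (rs : List Int) (r : Int) : Int := ((pvRank rs).get? r).getD 0

lemma srs_nodup (rs : List Int) : (pvSrs rs).Nodup :=
  ((PySem.List.sorted_perm (PySem.Set.ofList rs) (fun x => x) false).nodup_iff).mpr
    (PySem.Set.nodup_ofList rs)

lemma rank_get (rs : List Int) (j : Nat) (hj : j < (pvSrs rs).length) :
    (pvRank rs).get? ((pvSrs rs)[j]) = some ((j : Int) + 1) := by
  have hsnd : ((PySem.List.enumerate (pvSrs rs) 0).map (fun p => p.2)) = pvSrs rs :=
    PySem.List.map_snd_enumerate (pvSrs rs) 0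
  have hitems : (pvRank rs).items
      = PySem.Dict.empty.items ++ (PySem.List.enumerate (pvSrs rs) 0).map
          (fun p => (p.2, p.1 + 1)) := by
    refine PySem.Dict.items_foldl_insert_fresh
      (l := PySem.List.enumerate (pvSrs rs) 0) (k := fun p => p.2) (v := fun p => p.1 + 1)
      (d := PySem.Dict.empty) ?_ ?_
    · intro a _; exact PySem.Dict.contains_empty (ν := Int) a
    · rw [hsnd]; exact srs_nodup rs
  have hkeysnd : (pvRank rs).keys.Nodup := by
    refine PySem.Dict.nodup_keys_foldl_insert_key
      (l := PySem.List.enumerate (pvSrs rs) 0) (key := fun p : Int × Int => p.2)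
      (f := fun _ p => p.1 + 1) (d := (PySem.Dict.empty : PySem.Dict Int Int)) ?_
    exact PySem.Dict.nodup_keys_empty
  have hmem : ((pvSrs rs)[j], (j : Int) + 1) ∈ (pvRank rs).items := by
    rw [hitems]
    simp only [PySem.Dict.empty, List.nil_append]
    refine List.mem_map.mpr ⟨((j : Int), (pvSrs rs)[j]), ?_, rfl⟩
    exact (PySem.List.mem_enumerate_iff _ _ _).mpr ⟨j, hj, by simp⟩
  exact PySem.Dict.get?_of_mem_items _ hmem hkeysnd

lemma rk_getElem (rs : List Int) (j : Nat) (hj : j < (pvSrs rs).length) :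
    pvRk rs ((pvSrs rs)[j]) = (j : Int) + 1 := by
  rw [pvRk, rank_get rs j hj]
  rfl

lemma pvRk_def (rs : List Int) (r : Int) : ((pvRank rs).get? r).getD 0 = pvRk rs r := rfl

lemma mem_srs_of_mem (rs : List Int) (r : Int) (hr : r ∈ rs) : r ∈ pvSrs rs := by
  rw [pvSrs, PySem.List.mem_sorted]
  exact (PySem.Set.mem_ofList rs r).mpr hr

lemma rk_bounds (rs : List Int) (r : Int) (hr : r ∈ rs) :
    1 ≤ pvRk rs r ∧ pvRk rs r ≤ ((pvSrs rs).length : Int) := by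
  obtain ⟨j, hj, rfl⟩ := List.getElem_of_mem (mem_srs_of_mem rs r hr)
  rw [rk_getElem rs j hj]
  omega

lemma rk_lt_iff (rs : List Int) (a b : Int) (ha : a ∈ rs) (hb : b ∈ rs) :
    pvRk rs a < pvRk rs b ↔ a < b := by
  obtain ⟨i, hi, rfl⟩ := List.getElem_of_mem (mem_srs_of_mem rs a ha)
  obtain ⟨j, hj, rfl⟩ := List.getElem_of_mem (mem_srs_of_mem rs b hb)
  rw [rk_getElem rs i hi, rk_getElem rs j hj]
  have hpw : (pvSrs rs).Pairwise (· < ·) := by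
    unfold pvSrs
    exact PySem.List.sorted_ofList_pairwise_lt rs
  rw [List.pairwise_iff_getElem] at hpw
  constructor
  · intro h
    exact hpw i j hi hj (by omega)
  · intro h
    rcases Nat.lt_trichotomy i j with hij | hij | hij
    · omega
    · subst hij
      exact absurd h (lt_irrefl _)
    · exact absurd (hpw j i hj hi hij) (by omega)

-- query/update fuel used by the port
lemma main_loop (rs : List Int) (K : Int) (L : List (Int × Int))
    (hpw : L.Pairwise (fun a b => a.1 < b.1 ∨ (a.1 = b.1 ∧ a.2 ≤ b.2)))
    (hmem : ∀ q ∈ L, q.2 ∈ rs) :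
    ∀ (suf pre : List (Int × Int)) (BIT : List Int) (cnt : Int),
    L = pre ++ suf →
    BIT.length = ((PySem.List.len (pvSrs rs)).toNat + 1) →
    (∀ k : Int, 0 ≤ k → k ≤ PySem.List.len (pvSrs rs) → qsum BIT k
        = ((pre.map (fun q => pvRk rs q.2)).countP (fun v => decide (v ≤ k)) : Int)) →
    cnt = (pre.countP (fun p => decide (K ≤ (cntLT L p : Int))) : Int) →
    ((suf.foldl
      (fun (st : List Int × Int) c =>
        let rk := ((pvRank rs).get? c.2).getD 0
        let cl := pvQuery st.1 ((PySem.List.len (pvSrs rs)).toNat + 1) (rk - 1)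
        let vc := if cl ≥ K then st.2 + 1 else st.2
        (pvUpdate st.1 (PySem.List.len (pvSrs rs)) ((PySem.List.len (pvSrs rs)).toNat + 1) rk 1, vc))
      (BIT, cnt)).2)
      = (L.countP (fun p => decide (K ≤ (cntLT L p : Int))) : Int) := by
  intro suf
  induction suf with
  | nil =>
    intro pre BIT cnt hL _ _ hcnt
    simp only [List.foldl_nil]
    rw [hcnt, hL, List.append_nil]
  | cons p suf' ih =>
    intro pre BIT cnt hL hlen hinv hcnt
    have hn0 : (0:Int) ≤ PySem.List.len (pvSrs rs) := by
      rw [PySem.List.len_eq]; positivity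
    set n' : Int := PySem.List.len (pvSrs rs) with hn'
    have hpmem : p ∈ L := by rw [hL]; simp
    have hprs : p.2 ∈ rs := hmem p hpmem
    have hrkb := rk_bounds rs p.2 hprs
    have hnlen : ((pvSrs rs).length : Int) = n' := by rw [hn', PySem.List.len_eq]
    have hrk1 : 1 ≤ pvRk rs p.2 := hrkb.1
    have hrkn : pvRk rs p.2 ≤ n' := by omega
    -- the queried value is exactly the double-loop count for p
    have hquery : pvQuery BIT (n'.toNat + 1) (pvRk rs p.2 - 1) = ((cntLT L p : Nat) : Int) := by
      rw [pvQuery_eq_qsum BIT (n'.toNat + 1) (pvRk rs p.2 - 1) (by omega)]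
      rw [hinv (pvRk rs p.2 - 1) (by omega) (by omega)]
      rw [List.countP_map]
      have hcong : pre.countP ((fun v => decide (v ≤ pvRk rs p.2 - 1)) ∘ (fun q => pvRk rs q.2))
          = pre.countP (fun q => decide (q.2 < p.2)) := by
        apply List.countP_congr
        intro q hq
        have hqL : q ∈ L := by rw [hL]; simp [hq]
        have hqrs : q.2 ∈ rs := hmem q hqL
        have hlt := rk_lt_iff rs q.2 p.2 hqrs hprs
        have hqb := rk_bounds rs q.2 hqrs
        simp only [Function.comp, decide_eq_true_eq]
        omega
      rw [hcong, prefix_count pre suf' p (by rw [← hL]; exact hpw), ← hL]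
    -- one step of the loop
    rw [List.foldl_cons]
    dsimp only
    rw [pvRk_def]
    refine ih (pre ++ [p]) _ _ (by rw [hL]; simp) ?_ ?_ ?_
    · rw [pvUpdate_length]; exact hlen
    · intro k hk0 hkn
      rw [qsum_update n' BIT (pvRk rs p.2) k hrk1 hrkn hk0 hkn (n'.toNat + 1) (by omega)
        (by omega)]
      rw [hinv k hk0 hkn]
      rw [List.map_append, List.countP_append]
      simp only [List.map_cons, List.map_nil, List.countP_cons, List.countP_nil]
      by_cases h : pvRk rs p.2 ≤ k
      · simp [h]
      · simp [h]
    · rw [List.countP_append]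
      simp only [List.countP_cons, List.countP_nil]
      rw [hquery, hcnt]
      by_cases h : K ≤ (cntLT L p : Int)
      · rw [if_pos (by exact_mod_cast h)]
        have hd : decide (K ≤ (cntLT L p : Int)) = true := by simp [h]
        simp [hd]
      · rw [if_neg (by exact_mod_cast h)]
        have hd : decide (K ≤ (cntLT L p : Int)) = false := by simp [h]
        simp [hd]

lemma alt_eq (es rs : List Int) (K : Int) :
    count_candidates_alt es rs K
      = (((es.zip rs).countP (fun p => decide (K ≤ (cntLT (es.zip rs) p : Int)))) : Int) := by
  unfold count_candidates_alt
  simp only [PySem.List.foldl_ite_add_one, ge_iff_le, zero_add]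
  simp only [cntLT]
  rfl

lemma qsum_replicate_zero (m : Nat) (k : Int) : qsum (List.replicate m (0:Int)) k = 0 := by
  rw [qsum]
  have h : ∀ c ∈ qChain k, (List.replicate m (0:Int)).getD c.toNat 0 = 0 := by
    intro c _
    rw [List.getD_eq_getElem?_getD]
    rcases lt_or_ge c.toNat m with h | h
    · simp [h]
    · rw [List.getElem?_eq_none (by simpa using h)]
      rfl
  rw [List.map_congr_left h]
  simp

-- ===== VERDICT (by name: the statement is the Claim_ definition above) =====
theorem count_candidates_spec : Claim_equal_count_candidates := by
  intro es rs K _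
  unfold Spec_count_candidates
  rw [alt_eq]
  simp only [count_candidates]
  have hperm : (PySem.List.sorted2 (es.zip rs) (fun p => p.1) (fun p => p.2) false).Perm
      (es.zip rs) := PySem.List.sorted2_perm _ _ _ _
  have hpw := sorted2_lex_pairwise (es.zip rs)
  have hmemL : ∀ q ∈ PySem.List.sorted2 (es.zip rs) (fun p => p.1) (fun p => p.2) false,
      q.2 ∈ rs := by
    intro q hq
    exact (List.of_mem_zip (hperm.subset hq)).2
  have hlen0 : (PySem.List.pyRepeat [(0:Int)] (PySem.List.len (pvSrs rs) + 1)).length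
      = (PySem.List.len (pvSrs rs)).toNat + 1 := by
    rw [PySem.List.pyRepeat_singleton, List.length_replicate, PySem.List.len_eq]
    omega
  have hinv0 : ∀ k : Int, 0 ≤ k → k ≤ PySem.List.len (pvSrs rs) →
      qsum (PySem.List.pyRepeat [(0:Int)] (PySem.List.len (pvSrs rs) + 1)) k
        = ((([] : List (Int × Int)).map (fun q => pvRk rs q.2)).countP
            (fun v => decide (v ≤ k)) : Int) := by
    intro k _ _
    rw [PySem.List.pyRepeat_singleton, qsum_replicate_zero]
    simp
  have hmain := main_loop rs K
    (PySem.List.sorted2 (es.zip rs) (fun p => p.1) (fun p => p.2) false) hpw hmemL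
    (PySem.List.sorted2 (es.zip rs) (fun p => p.1) (fun p => p.2) false) []
    (PySem.List.pyRepeat [(0:Int)] (PySem.List.len (pvSrs rs) + 1)) 0
    rfl hlen0 hinv0 (by simp)
  rw [hmain]
  have h1 : ∀ p, cntLT (PySem.List.sorted2 (es.zip rs) (fun p => p.1) (fun p => p.2) false) p
      = cntLT (es.zip rs) p := by
    intro p
    exact hperm.countP_eq _
  have h2 : (PySem.List.sorted2 (es.zip rs) (fun p => p.1) (fun p => p.2) false).countP
        (fun p => decide (K ≤ (cntLT (PySem.List.sorted2 (es.zip rs) (fun p => p.1)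
          (fun p => p.2) false) p : Int)))
      = (PySem.List.sorted2 (es.zip rs) (fun p => p.1) (fun p => p.2) false).countP
        (fun p => decide (K ≤ (cntLT (es.zip rs) p : Int))) := by
    apply List.countP_congr
    intro p _
    rw [h1 p]
  rw [h2, hperm.countP_eq]
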